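-- pv_equiv track=rewrite | github.com/Lucian-D-W/zhanggong-impact-blueprint | .agents/skills/code-impact-guardian/scripts/generate_report.py | key_evidence_paths_payload
-- ===== SOURCE A (Python) =====
-- def key_evidence_paths_payload(seed_detail: dict | None, evidence_lines: list[str], changed_files: list[str]) -> list[str]:
--     paths: list[str] = []
--     if seed_detail and seed_detail.get("path"):
--         paths.append(seed_detail["path"])
--     paths.extend(changed_files)
--     for line in evidence_lines:
--         if " from `" in line:
--             candidate = line.split(" from `", 1)[1].split("`", 1)[0]
--             paths.append(candidate)
--     seen: set[str] = set()
--     ordered: list[str] = []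
--     for item in paths:
--         if item and item not in seen:
--             seen.add(item)
--             ordered.append(item)
--     return ordered[:6]
-- ===== SOURCE B (Python) =====
-- def key_evidence_paths_payload(seed_detail: dict | None, evidence_lines: list[str], changed_files: list[str]) -> list[str]:
--     cands: list[str] = []
--     if seed_detail and seed_detail.get("path"):
--         cands.append(seed_detail["path"])
--     cands += changed_files
--     cands += [line.split(" from `", 1)[1].split("`", 1)[0]
--               for line in evidence_lines if " from `" in line]
--
--     def pick(items: list[str], k: int) -> list[str]:
--         # drop falsy heads, take the first real path, purge its duplicates
--         # from the remainder, recurse with one fewer slot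
--         while items and not items[0]:
--             items = items[1:]
--         if k == 0 or not items:
--             return []
--         head = items[0]
--         return [head] + pick([x for x in items[1:] if x != head], k - 1)
--
--     return pick(cands, 6)
-- ===== Notes on version B (the rewrite author's own statement) =====
-- stated objective: alternative
-- what changed: B replaces A's seen-set accumulation loop plus final [:6] slice by a budgeted recursion with no auxiliary set at all: each step takes the first truthy candidate, filters its duplicates out of the remaining list, and recurses with one fewer slot, stopping at depth 6.
import Mathlib
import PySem

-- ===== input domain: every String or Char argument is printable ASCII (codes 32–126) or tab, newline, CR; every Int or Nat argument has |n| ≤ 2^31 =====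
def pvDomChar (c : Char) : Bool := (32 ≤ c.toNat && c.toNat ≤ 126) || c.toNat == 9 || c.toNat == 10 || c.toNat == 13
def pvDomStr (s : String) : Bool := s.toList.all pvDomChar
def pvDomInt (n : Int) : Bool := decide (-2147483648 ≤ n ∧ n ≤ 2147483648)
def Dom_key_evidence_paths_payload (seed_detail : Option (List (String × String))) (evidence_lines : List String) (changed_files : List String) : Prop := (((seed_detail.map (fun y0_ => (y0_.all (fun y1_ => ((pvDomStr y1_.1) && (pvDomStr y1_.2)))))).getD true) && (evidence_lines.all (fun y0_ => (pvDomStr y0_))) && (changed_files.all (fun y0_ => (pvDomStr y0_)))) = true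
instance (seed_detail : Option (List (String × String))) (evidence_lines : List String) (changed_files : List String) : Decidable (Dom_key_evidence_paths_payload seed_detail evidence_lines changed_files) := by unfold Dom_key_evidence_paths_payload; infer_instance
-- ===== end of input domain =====

-- B replaces A's seen-set dedup loop + [:6] slice by a budgeted recursion without any
-- auxiliary set: take the first truthy candidate, filter its duplicates from the rest,
-- recurse with one fewer of 6 slots (objective: alternative; same return value).

-- ===== PORT A =====
-- line.split(" from `", 1)[1].split("`", 1)[0]  (both Pythons contain this exact expression)
def pvCandidate (line : String) : String :=
  let rest := ((PySem.Str.splitMax? line " from `" 1).getD []).getD 1 ""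
  ((PySem.Str.splitMax? rest "`" 1).getD []).getD 0 ""

def key_evidence_paths_payload (seed_detail : Option (List (String × String))) (evidence_lines : List String) (changed_files : List String) : List String :=
  -- if seed_detail and seed_detail.get("path"): paths.append(seed_detail["path"])
  let paths : List String :=
    match seed_detail with
    | none => []
    | some d =>
      if d ≠ [] then
        match List.lookup "path" d with
        | some p => if p ≠ "" then [p] else []
        | none => []
      else []
  let paths := paths ++ changed_files
  let paths := evidence_lines.foldl (fun acc line =>
      if PySem.Str.isIn " from `" line then acc ++ [pvCandidate line] else acc) paths
  let st := paths.foldl (fun (st : PySem.Set String × List String) item =>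
      if item ≠ "" ∧ item ∉ st.1 then (PySem.Set.add st.1 item, st.2 ++ [item]) else st)
      (PySem.Set.empty, [])
  PySem.List.slice st.2 none (some 6)

-- ===== PORT B =====
-- 'while items and not items[0]: items = items[1:]'
def pvSkip : List String → List String
  | [] => []
  | h :: t => if h = "" then pvSkip t else h :: t

-- pick(items, k): drop falsy heads; take head, purge duplicates from the rest, recurse on k-1
def pvPick (items : List String) (k : Nat) : List String :=
  match k, pvSkip items with
  | 0, _ => []
  | _, [] => []
  | k + 1, h :: t => h :: pvPick (t.filter (fun x => x ≠ h)) k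

def key_evidence_paths_payload_alt (seed_detail : Option (List (String × String))) (evidence_lines : List String) (changed_files : List String) : List String :=
  let seedPart : List String :=
    match seed_detail with
    | none => []
    | some d =>
      if d ≠ [] then
        match List.lookup "path" d with
        | some p => if p ≠ "" then [p] else []
        | none => []
      else []
  let cands := seedPart ++ changed_files ++ evidence_lines.filterMap (fun line =>
      if PySem.Str.isIn " from `" line then some (pvCandidate line) else none)
  pvPick cands 6

-- ===== PRECONDITION & SPEC =====
def Spec_key_evidence_paths_payload (seed_detail : Option (List (String × String))) (evidence_lines : List String) (changed_files : List String) (out : List String) : Prop := out = key_evidence_paths_payload_alt seed_detail evidence_lines changed_files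
instance (seed_detail : Option (List (String × String))) (evidence_lines : List String) (changed_files : List String) (out : List String) : Decidable (Spec_key_evidence_paths_payload seed_detail evidence_lines changed_files out) := by unfold Spec_key_evidence_paths_payload; infer_instance

-- ===== CLAIM =====
def Claim_equal_key_evidence_paths_payload : Prop := ∀ (seed_detail : Option (List (String × String))) (evidence_lines : List String) (changed_files : List String), Dom_key_evidence_paths_payload seed_detail evidence_lines changed_files → Spec_key_evidence_paths_payload seed_detail evidence_lines changed_files (key_evidence_paths_payload seed_detail evidence_lines changed_files)

-- ===== LEMMAS AND PROOFS =====

-- A's dedup step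
def pvStep (st : PySem.Set String × List String) (item : String) : PySem.Set String × List String :=
  if item ≠ "" ∧ item ∉ st.1 then (PySem.Set.add st.1 item, st.2 ++ [item]) else st

theorem pvSkip_length_le (l : List String) : (pvSkip l).length ≤ l.length := by
  induction l with
  | nil => simp [pvSkip]
  | cons a t ih =>
    simp only [pvSkip]
    split_ifs
    · exact le_trans ih (by simp)
    · simp

theorem pvSkip_head_ne (items hd : _) (t : List String) (h : pvSkip items = hd :: t) :
    hd ≠ "" := by
  induction items with
  | nil => simp [pvSkip] at h
  | cons a l ih =>
    simp only [pvSkip] at h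
    split_ifs at h with ha
    · exact ih h
    · rw [← (List.cons.injEq ..).mp h |>.1]; exact ha

-- the unbounded version of B's recursion (pvPick = its take)
def pvDedup : List String → List String
  | [] => []
  | h :: t => if h = "" then pvDedup t else h :: pvDedup (t.filter (fun x => x ≠ h))
termination_by l => l.length
decreasing_by
  · simp
  · simp only [List.length_cons, List.length_unattach]
    exact Nat.lt_succ_of_le (le_trans (List.length_filter_le _ _) (by simp))

theorem pvDedup_cons_empty (l : List String) : pvDedup ("" :: l) = pvDedup l := by
  rw [pvDedup]; simp

theorem pvDedup_cons (h : String) (l : List String) (hh : h ≠ "") :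
    pvDedup (h :: l) = h :: pvDedup (l.filter (fun x => x ≠ h)) := by
  rw [pvDedup]; simp [hh]

theorem pvDedup_skip (items : List String) : pvDedup items = pvDedup (pvSkip items) := by
  induction items with
  | nil => rfl
  | cons a l ih =>
    by_cases ha : a = ""
    · subst ha; rw [pvDedup_cons_empty, ih]; simp [pvSkip]
    · simp [pvSkip, ha]

-- A's fold equals pvDedup of the candidates not already seen
theorem pvFold_eq_dedup (items : List String) (seen : PySem.Set String) (ordered : List String) :
    (items.foldl pvStep (seen, ordered)).2
      = ordered ++ pvDedup (items.filter (fun x => decide (x ∉ seen))) := by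
  induction items generalizing seen ordered with
  | nil => simp [pvDedup]
  | cons x xs ih =>
    simp only [List.foldl_cons]
    by_cases hin : x ∈ seen
    · have hstep : pvStep (seen, ordered) x = (seen, ordered) := by simp [pvStep, hin]
      rw [hstep, ih]
      simp [hin]
    · by_cases hx : x = ""
      · subst hx
        have hstep : pvStep (seen, ordered) "" = (seen, ordered) := by simp [pvStep]
        rw [hstep, ih]
        simp [hin, pvDedup_cons_empty]
      · have hstep : pvStep (seen, ordered) x = (PySem.Set.add seen x, ordered ++ [x]) := by
          simp [pvStep, hx, hin]
        rw [hstep, ih]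
        have hcons : List.filter (fun a => decide (a ∉ seen)) (x :: xs)
            = x :: List.filter (fun a => decide (a ∉ seen)) xs := by
          simp [hin]
        rw [hcons, pvDedup_cons x _ hx, List.filter_filter]
        have hfe : List.filter (fun a => decide (a ∉ PySem.Set.add seen x)) xs
            = List.filter (fun a => decide (a ≠ x) && decide (a ∉ seen)) xs := by
          apply List.filter_congr
          intro a _
          by_cases h1 : a = x <;> by_cases h2 : a ∈ seen <;>
            simp [h1, h2, PySem.Set.mem_add]
        rw [hfe]
        simp

-- B's budgeted recursion is the take of the unbounded one
theorem pvPick_eq_take (items : List String) (k : Nat) :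
    pvPick items k = (pvDedup items).take k := by
  induction hn : items.length using Nat.strong_induction_on generalizing items k with
  | _ n ih =>
  rw [pvDedup_skip]
  cases h : pvSkip items with
  | nil => cases k <;> simp [pvPick, h, pvDedup]
  | cons hd t =>
    have hhd : hd ≠ "" := pvSkip_head_ne items hd t h
    cases k with
    | zero => rw [pvPick.eq_def, h]; simp
    | succ k =>
      rw [pvDedup_cons hd t hhd, pvPick.eq_def, h]
      simp only [List.take_succ_cons]
      have hle : (pvSkip items).length ≤ items.length := pvSkip_length_le items
      rw [h] at hle
      simp only [List.length_cons] at hle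
      have hflt := List.length_filter_le (fun x => x ≠ hd) t
      show hd :: pvPick (t.filter (fun x => x ≠ hd)) k = _
      rw [ih (t.filter (fun x => x ≠ hd)).length (by omega) _ k rfl]

-- 'if p(x): out.append(f(x))' over ev, as a filterMap (the shape of B's comprehension)
theorem pvFilterMap (ev : List String) :
    List.map pvCandidate (List.filter (fun l => PySem.Str.isIn " from `" l) ev)
    = ev.filterMap (fun line =>
        if PySem.Str.isIn " from `" line then some (pvCandidate line) else none) := by
  induction ev with
  | nil => rfl
  | cons l t ih =>
    cases h : PySem.Chars.isIn [' ', 'f', 'r', 'o', 'm', ' ', '`'] l.toList <;>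
      simp [h] <;> simpa using ih

-- both sides with the (shared) seed contribution abstracted out
theorem pvMain (s0 ch ev : List String) :
    PySem.List.slice
      ((ev.foldl (fun acc line =>
          if PySem.Str.isIn " from `" line then acc ++ [pvCandidate line] else acc) (s0 ++ ch)).foldl
        pvStep (PySem.Set.empty, [])).2 none (some 6)
    = pvPick (s0 ++ ch ++ ev.filterMap (fun line =>
        if PySem.Str.isIn " from `" line then some (pvCandidate line) else none)) 6 := by
  rw [PySem.List.foldl_append_if, pvFold_eq_dedup, pvPick_eq_take,
    show ((6 : Int)) = ((6 : Nat) : Int) from rfl, PySem.List.slice_to_natCast]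
  have hf : List.filter (fun x : String => decide (x ∉ PySem.Set.empty))
      ((s0 ++ ch) ++ List.map pvCandidate (List.filter (fun l => PySem.Str.isIn " from `" l) ev))
      = (s0 ++ ch) ++ List.map pvCandidate (List.filter (fun l => PySem.Str.isIn " from `" l) ev) := by
    apply List.filter_eq_self.mpr
    intro a _
    simp [PySem.Set.empty]
  rw [hf, pvFilterMap]
  simp [List.append_assoc]

-- ===== VERDICT =====
theorem key_evidence_paths_payload_spec : Claim_equal_key_evidence_paths_payload := by
  intro seed ev ch _
  show key_evidence_paths_payload seed ev ch = key_evidence_paths_payload_alt seed ev ch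
  unfold key_evidence_paths_payload key_evidence_paths_payload_alt
  exact pvMain _ ch ev
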